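-- pv_equiv track=rewrite | github.com/noblecloud/LevityDash | src/LevityDash/lib/utils/shared.py | subsequenceCheck
-- ===== SOURCE A (Python) =====
-- from typing import (
-- 	Any, Awaitable, Callable, Coroutine, ForwardRef, Hashable, Iterable, List, Mapping, NamedTuple, Optional, Tuple, Type,
-- 	TYPE_CHECKING, TypeVar, Union, Set, Final, ClassVar, Dict, Protocol, runtime_checkable, get_args
-- )
--
-- def matchWildCard(x, y, wildcard: str = '*', namedWildcard: str = '@') -> bool:
-- 	return x == y or any(str(i).startswith(namedWildcard) or i == wildcard for i in (x, y))
--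
-- def subsequenceCheck(input_: List[str], compare: List[str], strict: bool = False) -> bool:
-- 	'''
-- 	Compare two lists to determine if input is a subsequence of compare with wildcard _values respected
-- 	:param input_: possible subsequence
-- 	:type input_: Iterable
-- 	:param compare: sequence to compare against
-- 	:type compare: Iterable
-- 	:return: True if input is a subsequence of compare, False otherwise
-- 	:rtype: bool
-- 	:param strict: if True, input length must match compare length
-- 	:type strict: bool
-- 	'''
-- 	if strict:
-- 		if len(input_) != len(compare):
-- 			return False
-- 	# if the first value of the input is not in the compare sequence, return False
-- 	if not any(startArray := [matchWildCard(input_[0], i) for i in compare]):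
-- 		return False
-- 	# otherwise, find the index of the that first value in compare
-- 	else:
-- 		start = startArray.index(True)
--
-- 	# ignore everything before the first value of the input
-- 	it = iter(compare[start:])
--
-- 	# iterate through the input and compare against the compare sequence
-- 	for i in input_:
-- 		try:
-- 			n = next(it)
--
-- 			# if the value matches, continue
-- 			if matchWildCard(i, n):
-- 				continue
-- 			else:
-- 				# otherwise, start over with the remaining _values of the compare sequence
-- 				remainder = list(it)
-- 				return subsequenceCheck(input_, remainder, strict)
--
-- 		# if the compare sequence is exhausted, return False
-- 		except StopIteration:
-- 			return False
-- 	return True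
-- ===== SOURCE B (Python) =====
-- def matchWildCard(x, y, wildcard: str = '*', namedWildcard: str = '@') -> bool:
--     return x == y or any(str(i).startswith(namedWildcard) or i == wildcard for i in (x, y))
--
-- def subsequenceCheck(input_, compare, strict=False):
--     # iterative version: rebind `compare` to the remaining slice instead of recursing
--     while True:
--         if strict and len(input_) != len(compare):
--             return False
--         start = next((k for k, c in enumerate(compare) if matchWildCard(input_[0], c)), None)
--         if start is None:
--             return False
--         restart = None
--         for pos, i in enumerate(input_):
--             idx = start + pos
--             if idx >= len(compare):
--                 return False
--             if not matchWildCard(i, compare[idx]):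
--                 restart = idx + 1
--                 break
--         else:
--             return True
--         compare = compare[restart:]
-- ===== Notes on version B (the rewrite author's own statement) =====
-- stated objective: simpler
-- what changed: A's tail recursion that rebuilds the remaining compare list and re-enters the whole function is replaced by a single iterative while-loop that rebinds compare to the remaining slice and walks input_ against it by index.
import Mathlib
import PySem

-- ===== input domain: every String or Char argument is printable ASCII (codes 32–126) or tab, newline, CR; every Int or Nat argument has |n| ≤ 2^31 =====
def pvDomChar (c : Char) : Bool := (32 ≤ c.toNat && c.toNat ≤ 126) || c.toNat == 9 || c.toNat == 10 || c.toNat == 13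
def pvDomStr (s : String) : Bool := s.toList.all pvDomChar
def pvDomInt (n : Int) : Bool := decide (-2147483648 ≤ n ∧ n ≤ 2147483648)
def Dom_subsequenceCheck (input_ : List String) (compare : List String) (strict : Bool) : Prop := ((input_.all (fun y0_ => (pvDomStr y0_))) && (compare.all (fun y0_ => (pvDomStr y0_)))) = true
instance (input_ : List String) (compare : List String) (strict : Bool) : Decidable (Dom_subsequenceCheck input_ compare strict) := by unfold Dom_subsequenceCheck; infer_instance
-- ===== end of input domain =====

-- B replaces A's tail recursion on the remaining compare slice by a single iterative loop
-- (rebinding `compare`) with an indexed walk; objective: simpler (no recursion, no rebuilt lists).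
-- ===== PORT A =====
def matchWildCard (x : String) (y : String) : Bool :=
  x == y || ((PySem.Str.startswith x "@" || x == "*") || (PySem.Str.startswith y "@" || y == "*"))

-- result of A's `for i in input_` loop over the iterator `it`
inductive WalkA where
  | ok : WalkA
  | exhausted : WalkA
  | restart : List String → WalkA
deriving DecidableEq, Repr

def walkA : List String → List String → WalkA
  | [], _ => .ok
  | _ :: _, [] => .exhausted
  | i :: is, n :: ns => if matchWildCard i n then walkA is ns else .restart ns

theorem walkA_restart_lt : ∀ (is l rem : List String), walkA is l = .restart rem → rem.length < l.length := by
  intro is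
  induction is with
  | nil => intro l rem h; simp [walkA] at h
  | cons i is ih =>
    intro l rem h
    cases l with
    | nil => simp [walkA] at h
    | cons n ns =>
      by_cases hm : matchWildCard i n = true
      · have := ih ns rem (by simpa [walkA, hm] using h)
        simp; omega
      · have : ns = rem := by simpa [walkA, hm] using h
        subst this; simp

def subsequenceCheck (input_ : List String) (compare : List String) (strict : Bool) : Bool :=
  if strict && (input_.length != compare.length) then false
  else
    let startArray := compare.map (fun c => matchWildCard (input_.headD "") c)
    if !(startArray.any (fun b => b)) then false
    else
      let start := (PySem.List.index? startArray true).getD 0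
      match h : walkA input_ (compare.drop start) with
      | .ok => true
      | .exhausted => false
      | .restart rem => subsequenceCheck input_ rem strict
termination_by compare.length
decreasing_by
  have h1 := walkA_restart_lt _ _ _ h
  have h2 : (compare.drop start).length ≤ compare.length := by simp
  omega

-- ===== PORT B =====
-- result of B's indexed `for pos, i in enumerate(input_)` walk
inductive WalkB where
  | yes : WalkB
  | no : WalkB
  | again : Nat → WalkB
deriving DecidableEq, Repr

def walkB (compare : List String) (start : Nat) : List String → Nat → WalkB
  | [], _ => .yes
  | i :: is, pos =>
    match compare[start + pos]? with
    | none => .no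
    | some c => if matchWildCard i c then walkB compare start is (pos + 1) else .again (start + pos + 1)

theorem walkB_again_bounds : ∀ (is : List String) (pos r : Nat) (compare : List String) (start : Nat),
    walkB compare start is pos = .again r → 0 < r ∧ r ≤ compare.length := by
  intro is
  induction is with
  | nil => intro pos r compare start h; simp [walkB] at h
  | cons i is ih =>
    intro pos r compare start h
    unfold walkB at h
    cases hg : compare[start + pos]? with
    | none => simp [hg] at h
    | some c =>
      by_cases hm : matchWildCard i c = true
      · exact ih (pos + 1) r compare start (by simpa [hg, hm] using h)
      · have hr : start + pos + 1 = r := by simpa [hg, hm] using h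
        have hlt : start + pos < compare.length := by
          have := List.getElem?_eq_some_iff.mp hg
          exact this.1
        omega

def subsequenceCheck_alt (input_ : List String) (compare : List String) (strict : Bool) : Bool :=
  if strict && (input_.length != compare.length) then false
  else
    match List.findIdx? (fun c => matchWildCard (input_.headD "") c) compare with
    | none => false
    | some start =>
      match h : walkB compare start input_ 0 with
      | .yes => true
      | .no => false
      | .again restart => subsequenceCheck_alt input_ (compare.drop restart) strict
termination_by compare.length
decreasing_by
  have h1 := walkB_again_bounds _ _ _ _ _ h
  simp
  omega

-- ===== PRECONDITION & SPEC =====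
-- Pre_ excludes exactly the inputs where the Python A raises IndexError (input_[0] on an
-- empty input_ with a non-empty compare, unless the strict length check returns first).
def Pre_subsequenceCheck (input_ : List String) (compare : List String) (strict : Bool) : Prop :=
  ¬ (input_ = [] ∧ compare ≠ [] ∧ strict = false)
instance (input_ : List String) (compare : List String) (strict : Bool) : Decidable (Pre_subsequenceCheck input_ compare strict) := by unfold Pre_subsequenceCheck; infer_instance
def pvWitness_subsequenceCheck : List String × List String × Bool := (["a", "*"], ["a", "b"], false)

def Spec_subsequenceCheck (input_ : List String) (compare : List String) (strict : Bool) (out : Bool) : Prop := out = subsequenceCheck_alt input_ compare strict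
instance (input_ : List String) (compare : List String) (strict : Bool) (out : Bool) : Decidable (Spec_subsequenceCheck input_ compare strict out) := by unfold Spec_subsequenceCheck; infer_instance

-- ===== CLAIM (what is proved, stated in full; the proofs are below) =====
def Claim_equal_subsequenceCheck : Prop := ∀ (input_ : List String) (compare : List String) (strict : Bool), Dom_subsequenceCheck input_ compare strict → Pre_subsequenceCheck input_ compare strict → Spec_subsequenceCheck input_ compare strict (subsequenceCheck input_ compare strict)

-- ===== LEMMAS AND PROOFS =====

-- A's startArray.index(True) equals B's findIdx? over compare
theorem index?_map_true (p : String → Bool) (l : List String) :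
    PySem.List.index? (l.map p) true = List.findIdx? p l := by
  rw [PySem.List.index?_eq_idxOf?]
  unfold List.idxOf?
  rw [List.findIdx?_map]
  congr 1
  funext c
  simp [Function.comp]

-- the two inner walks correspond: B's indexed walk at offset start+pos is A's walk over the slice
theorem walk_corr (compare : List String) (start : Nat) : ∀ (is : List String) (pos : Nat),
    walkA is (compare.drop (start + pos)) =
      match walkB compare start is pos with
      | .yes => .ok
      | .no => .exhausted
      | .again r => .restart (compare.drop r) := by
  intro is
  induction is with
  | nil => intro pos; simp [walkA, walkB]
  | cons i is ih =>
    intro pos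
    cases hg : compare[start + pos]? with
    | none =>
      have hge : compare.length ≤ start + pos := by
        simpa using List.getElem?_eq_none_iff.mp hg
      rw [List.drop_eq_nil_of_le hge]
      simp [walkA, walkB, hg]
    | some c =>
      have hlt : start + pos < compare.length := (List.getElem?_eq_some_iff.mp hg).1
      have hc : compare[start + pos] = c := (List.getElem?_eq_some_iff.mp hg).2
      have hdrop : compare.drop (start + pos) = c :: compare.drop (start + pos + 1) := by
        rw [List.drop_eq_getElem_cons hlt, hc]
      rw [hdrop]
      by_cases hm : matchWildCard i c = true
      · have h2 := ih (pos + 1)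
        rw [show start + (pos + 1) = start + pos + 1 by omega] at h2
        simpa [walkA, walkB, hg, hm] using h2
      · simp [walkA, walkB, hg, hm]

theorem main_eq : ∀ (n : Nat) (compare : List String), compare.length < n →
    ∀ (input_ : List String) (strict : Bool),
      subsequenceCheck input_ compare strict = subsequenceCheck_alt input_ compare strict := by
  intro n
  induction n with
  | zero => intro compare h; omega
  | succ n ih =>
    intro compare hlen input_ strict
    rw [subsequenceCheck, subsequenceCheck_alt]
    by_cases hs : (strict && (input_.length != compare.length)) = true
    · simp [hs]
    · simp only [hs, if_false, Bool.false_eq_true]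
      set p := fun c => matchWildCard (input_.headD "") c with hp
      have hany : (compare.map p).any (fun b => b) = (List.findIdx? p compare).isSome := by
        rw [List.any_map, List.findIdx?_isSome]
        rfl
      cases hf : List.findIdx? p compare with
      | none => simp [hany, hf]
      | some start =>
        have hidx : PySem.List.index? (compare.map p) true = some start := by
          rw [index?_map_true, hf]
        have hcorr := walk_corr compare start input_ 0
        rw [Nat.add_zero] at hcorr
        simp only [hany, hf, Option.isSome_some, Bool.not_true, Bool.false_eq_true, if_false]
        split <;> rename_i heqA <;> rw [hidx, Option.getD_some] at heqA <;>
          rw [heqA] at hcorr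
        · -- walkA = .ok
          split <;> rename_i heqB <;> rw [heqB] at hcorr <;> simp_all
        · -- walkA = .exhausted
          split <;> rename_i heqB <;> rw [heqB] at hcorr <;> simp_all
        · -- walkA = .restart rem: both sides recurse on the same remainder
          rename_i rem
          split <;> rename_i heqB <;> rw [heqB] at hcorr
          · simp at hcorr
          · simp at hcorr
          · rename_i r
            have hrem : rem = compare.drop r := by simpa using hcorr
            have hbnd := walkB_again_bounds _ _ _ _ _ heqB
            have hlt2 : (compare.drop r).length < n := by simp; omega
            rw [hrem]
            exact ih (compare.drop r) hlt2 input_ strict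

-- ===== VERDICT (by name: the statement is the Claim_ definition above) =====
theorem subsequenceCheck_spec : Claim_equal_subsequenceCheck := by
  intro input_ compare strict _ _
  unfold Spec_subsequenceCheck
  exact main_eq (compare.length + 1) compare (by omega) input_ strict
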